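-- pv_equiv track=rewrite | github.com/Alok1721/CompetitiveCoding_DSA | OA/cred/tempCodeRunnerFile.py | count_pure_sequences
-- ===== SOURCE A (Python) =====
-- def count_pure_sequences(d):
--     MOD = 10**9 + 7
--
--     # Precompute for each digit (0-9) which digits are allowed to follow it
--     # A digit x can be placed if any of its divisors (except 1) has been used before
--     # or if x is 0 (which can be placed after first position)
--
--     # First, precompute all proper divisors (excluding 1) for digits 1-9
--     proper_divisors = [
--         [],           # 0
--         [],           # 1
--         [2],          # 2
--         [3],          # 3
--         [2, 4],       # 4
--         [5],          # 5
--         [2, 3, 6],    # 6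
--         [7],          # 7
--         [2, 4, 8],    # 8
--         [3, 9]        # 9
--     ]
--
--     # dp[mask] = number of ways with the given set of used digits (mask)
--     # Initialize with first digit (1-9)
--     dp = [0] * 1024  # 2^10 possible masks
--     for i in range(1, 10):
--         dp[1 << i] = 1
--
--     for _ in range(1, d):
--         new_dp = [0] * 1024
--         for mask in range(1024):
--             if dp[mask] == 0:
--                 continue
--
--             # Try to place each digit 0-9
--             for digit in range(10):
--                 if digit == 0:
--                     # Can place 0 if not first digit
--                     if mask != 0:  # Not first digit
--                         new_mask = mask | (1 << digit)
--                         new_dp[new_mask] = (new_dp[new_mask] + dp[mask]) % MOD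
--                 else:
--                     # Can place digit if it has no proper divisors or any of its divisors were used
--                     can_place = True
--                     if proper_divisors[digit]:  # If it has proper divisors
--                         can_place = any((mask & (1 << d)) for d in proper_divisors[digit])
--
--                     if can_place:
--                         new_mask = mask | (1 << digit)
--                         new_dp[new_mask] = (new_dp[new_mask] + dp[mask]) % MOD
--
--         dp = new_dp
--
--     return sum(dp) % MOD
-- ===== SOURCE B (Python) =====
-- def count_pure_sequences(d):
--     # Closed form: from a first digit s, the set of digits allowed at every later
--     # position is fixed (it depends only on s), so the count from s is c(s)**steps:
--     # s=1 -> 2 choices (0,1); s=2 -> 6 (0,1,2,4,6,8); s=3 -> 5 (0,1,3,6,9);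
--     # s=4 -> 4 (0,1,4,8); s in {5,6,7,8,9} -> 3 (0,1,s).
--     MOD = 10**9 + 7
--     n = max(d - 1, 0)  # number of extension steps after the first digit
--     return (pow(2, n, MOD) + 5 * pow(3, n, MOD) + pow(4, n, MOD)
--             + pow(5, n, MOD) + pow(6, n, MOD)) % MOD
-- ===== Notes on version B (the rewrite author's own statement) =====
-- stated objective: faster
-- what changed: Replaces the O(d*1024*10) bitmask DP with a closed form: from each first digit the set of placeable digits never grows, so the answer is 2^n+5*3^n+4^n+5^n+6^n mod p with n = max(d-1,0) extension steps, computed by modular exponentiation.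
import Mathlib
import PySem

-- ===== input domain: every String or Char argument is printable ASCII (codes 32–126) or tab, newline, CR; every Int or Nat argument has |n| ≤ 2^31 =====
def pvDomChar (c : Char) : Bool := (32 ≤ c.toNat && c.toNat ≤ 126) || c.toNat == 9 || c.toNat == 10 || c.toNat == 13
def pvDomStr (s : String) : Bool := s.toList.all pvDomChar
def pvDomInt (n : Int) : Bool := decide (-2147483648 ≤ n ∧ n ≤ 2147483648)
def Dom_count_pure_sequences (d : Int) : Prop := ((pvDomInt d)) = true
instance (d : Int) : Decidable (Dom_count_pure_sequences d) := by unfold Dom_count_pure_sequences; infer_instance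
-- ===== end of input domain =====

set_option maxRecDepth 100000


-- B replaces A's O(d·1024·10) bitmask DP by the closed form
-- 2^n + 5·3^n + 4^n + 5^n + 6^n mod p with n = max(d-1,0) DP steps (modular exponentiation).

-- ===== PORT A =====
def pvMOD : Int := 10 ^ 9 + 7

def pvProperDivisors : List (List Int) :=
  [[], [], [2], [3], [2, 4], [5], [2, 3, 6], [7], [2, 4, 8], [3, 9]]

-- new_dp[j] = (new_dp[j] + x) % MOD  (in A every written index is in [0, 1024))
def pvUpd (nd : List Int) (j : Nat) (x : Int) : List Int :=
  nd.set j ((nd.getD j 0 + x) % pvMOD)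

-- the body of A's inner `for digit in range(10)` loop, for one digit
def pvPlaceDigit (dp : List Int) (mask : Int) (nd : List Int) (digit : Int) : List Int :=
  if digit = 0 then
    if mask ≠ 0 then
      pvUpd nd (mask.toNat ||| (1 <<< digit.toNat)) (dp.getD mask.toNat 0)
    else nd
  else
    let divs := pvProperDivisors.getD digit.toNat []
    let can_place : Bool :=
      if divs.isEmpty then true
      else divs.any (fun dd => (mask.toNat &&& ((1 : Nat) <<< dd.toNat)) != 0)
    if can_place then
      pvUpd nd (mask.toNat ||| (1 <<< digit.toNat)) (dp.getD mask.toNat 0)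
    else nd

-- one iteration of A's `for _ in range(1, d)` loop (masks are 0 ≤ mask < 1024)
def pvStep (dp : List Int) : List Int :=
  (PySem.List.pyRange 0 1024 1).foldl (fun nd mask =>
    if dp.getD mask.toNat 0 = 0 then nd
    else (PySem.List.pyRange 0 10 1).foldl (pvPlaceDigit dp mask) nd)
    (List.replicate 1024 0)

-- dp after the initialisation loop `for i in range(1, 10): dp[1 << i] = 1`
def pvInit : List Int :=
  (PySem.List.pyRange 1 10 1).foldl (fun dp i => dp.set ((1 : Nat) <<< i.toNat) 1)
    (List.replicate 1024 0)

def count_pure_sequences (d : Int) : Int :=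
  let dp := (PySem.List.pyRange 1 d 1).foldl (fun dp _ => pvStep dp) pvInit
  (dp.foldl (· + ·) 0) % pvMOD

-- ===== PORT B =====
def count_pure_sequences_alt (d : Int) : Int :=
  let MOD : Int := 10 ^ 9 + 7
  let n : Nat := (d - 1).toNat  -- max(d - 1, 0)
  (PySem.Int.powMod 2 n MOD + 5 * PySem.Int.powMod 3 n MOD + PySem.Int.powMod 4 n MOD
    + PySem.Int.powMod 5 n MOD + PySem.Int.powMod 6 n MOD) % MOD

-- ===== PRECONDITION & SPEC =====
def Spec_count_pure_sequences (d : Int) (out : Int) : Prop := out = count_pure_sequences_alt d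
instance (d : Int) (out : Int) : Decidable (Spec_count_pure_sequences d out) := by unfold Spec_count_pure_sequences; infer_instance

-- ===== CLAIM (what is proved, stated in full; the proofs are below) =====
def Claim_equal_count_pure_sequences : Prop := ∀ (d : Int), Dom_count_pure_sequences d → Spec_count_pure_sequences d (count_pure_sequences d)

-- ===== LEMMAS AND PROOFS =====

-- weighted sum of a 1024-entry dp vector, in ZMod (10^9+7)
def pvPhi (w : Nat → ZMod 1000000007) (dp : List Int) : ZMod 1000000007 :=
  ∑ j ∈ Finset.range 1024, w j * ((dp.getD j 0 : Int) : ZMod 1000000007)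

-- which next digits A's placement rule admits from mask m (Nat form of A's branch conditions)
def pvAllowed (m dgt : Nat) : Bool :=
  match dgt with
  | 0 => m != 0
  | 1 => true
  | 2 => (m &&& 4) != 0
  | 3 => (m &&& 8) != 0
  | 4 => ((m &&& 4) != 0) || ((m &&& 16) != 0)
  | 5 => (m &&& 32) != 0
  | 6 => ((m &&& 4) != 0) || ((m &&& 8) != 0) || ((m &&& 64) != 0)
  | 7 => (m &&& 128) != 0
  | 8 => ((m &&& 4) != 0) || ((m &&& 16) != 0) || ((m &&& 256) != 0)
  | 9 => ((m &&& 8) != 0) || ((m &&& 512) != 0)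
  | _ => false

-- total weight one step sends out of mask m
def pvCoef (w : Nat → ZMod 1000000007) (m : Nat) : ZMod 1000000007 :=
  ∑ dgt ∈ Finset.range 10, if pvAllowed m dgt then w (m ||| (1 <<< dgt)) else 0

-- masks that may NOT appear in the component of first digit s (bits outside {0,1} ∪ allowed(s))
def pvOut : List Nat := [0, 1020, 680, 436, 748, 988, 956, 892, 764, 508]
-- mask m belongs to the component of first digit s
def pvComp (s m : Nat) : Bool := ((m &&& (1 <<< s)) != 0) && ((m &&& pvOut.getD s 0) == 0)
-- mask m belongs to some component (is reachable, up to dp ≡ 0)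
def pvInU (m : Nat) : Bool := (List.range 9).any (fun i => pvComp (i + 1) m)
-- number of digits placeable from any mask of component s (constant on the component)
def pvW (s : Nat) : Nat := [0, 2, 6, 5, 4, 3, 3, 3, 3, 3].getD s 0
def pvInd (s : Nat) : Nat → ZMod 1000000007 := fun m => if pvComp s m then 1 else 0

-- entries outside ∪ components are ≡ 0 (mod p)
def pvZinv (dp : List Int) : Prop :=
  ∀ j, j < 1024 → pvInU j = false → ((dp.getD j 0 : Int) : ZMod 1000000007) = 0

theorem pv_list_sum_range (n : Nat) (M : Type) [AddCommMonoid M] (f : Nat → M) :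
    ∑ i ∈ Finset.range n, f i = ((List.range n).map f).sum := by
  induction n with
  | zero => simp
  | succ k ih => rw [Finset.sum_range_succ, List.range_succ]; simp [ih]


theorem pv_getD_set (l : List Int) (i jj : Nat) (a : Int) (h : jj < l.length) :
    (l.set i a).getD jj 0 = if i = jj then a else l.getD jj 0 := by
  simp [List.getD_eq_getElem?_getD, List.getElem?_set]
  split <;> simp_all

theorem pv_cast_mod (y : Int) : ((y % pvMOD : Int) : ZMod 1000000007) = (y : ZMod 1000000007) := by
  have h : (pvMOD : Int) = ((1000000007 : ℕ) : ℤ) := by norm_num [pvMOD]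
  rw [h, ZMod.intCast_mod]

theorem pvUpd_length (nd : List Int) (j : Nat) (x : Int) :
    (pvUpd nd j x).length = nd.length := by simp [pvUpd]

theorem pv_phi_upd (w : Nat → ZMod 1000000007) (nd : List Int) (hnd : nd.length = 1024)
    (j : Nat) (hj : j < 1024) (x : Int) :
    pvPhi w (pvUpd nd j x) = pvPhi w nd + w j * (x : ZMod 1000000007) := by
  unfold pvPhi pvUpd
  have hterm : ∀ i ∈ Finset.range 1024,
      w i * (((nd.set j ((nd.getD j 0 + x) % pvMOD)).getD i 0 : Int) : ZMod 1000000007)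
        = w i * ((nd.getD i 0 : Int) : ZMod 1000000007)
          + (if i = j then w j * (x : ZMod 1000000007) else 0) := by
    intro i hi
    rw [Finset.mem_range] at hi
    rw [pv_getD_set nd j i _ (by omega)]
    by_cases hij : j = i
    · subst hij
      rw [if_pos rfl, pv_cast_mod]
      push_cast
      rw [if_pos rfl]
      ring
    · rw [if_neg hij, if_neg (fun h => hij h.symm)]
      ring
  rw [Finset.sum_congr rfl hterm, Finset.sum_add_distrib, Finset.sum_ite_eq' (Finset.range 1024) j]
  simp [hj]

theorem pv_phi_ite_upd (w : Nat → ZMod 1000000007) (nd : List Int) (hnd : nd.length = 1024)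
    (j : Nat) (hj : j < 1024) (x : Int) (b : Bool) :
    pvPhi w (if b then pvUpd nd j x else nd)
      = pvPhi w nd + (if b then w j * (x : ZMod 1000000007) else 0) := by
  cases b <;> simp [pv_phi_upd w nd hnd j hj x]

-- A's digit-loop body is the uniform conditional update
theorem pv_placeDigit_eq (dp : List Int) (mask : Int) (h0 : 0 ≤ mask) (digit : Int)
    (hd : 0 ≤ digit) (hd' : digit < 10) (nd : List Int) :
    pvPlaceDigit dp mask nd digit
      = if pvAllowed mask.toNat digit.toNat then
          pvUpd nd (mask.toNat ||| (1 <<< digit.toNat)) (dp.getD mask.toNat 0)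
        else nd := by
  have hmn : mask.toNat = 0 ↔ mask = 0 := by omega
  interval_cases digit <;>
    simp only [pvPlaceDigit, pvAllowed, pvProperDivisors] <;>
    simp [show ((0:Int)).toNat = 0 from rfl, show ((1:Int)).toNat = 1 from rfl, show ((2:Int)).toNat = 2 from rfl, show ((3:Int)).toNat = 3 from rfl, show ((4:Int)).toNat = 4 from rfl, show ((5:Int)).toNat = 5 from rfl, show ((6:Int)).toNat = 6 from rfl, show ((7:Int)).toNat = 7 from rfl, show ((8:Int)).toNat = 8 from rfl, show ((9:Int)).toNat = 9 from rfl] <;>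
    first
    | (by_cases hm : mask = 0 <;> simp_all <;> omega)
    | rfl
    | (split_ifs <;> first | rfl | tauto)


theorem pv_phi_iteupd_fold (w : Nat → ZMod 1000000007) (m : Nat) (hm : m < 1024) (x : Int) :
    ∀ (ds : List Nat), (∀ dgt ∈ ds, dgt < 10) → ∀ (nd : List Int), nd.length = 1024 →
      pvPhi w (ds.foldl (fun nd dgt =>
          if pvAllowed m dgt then pvUpd nd (m ||| (1 <<< dgt)) x else nd) nd)
        = pvPhi w nd + (x : ZMod 1000000007) *
            ((ds.map (fun dgt => if pvAllowed m dgt then w (m ||| (1 <<< dgt)) else 0)).sum) := by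
  intro ds
  induction ds with
  | nil => intro _ nd hnd; simp
  | cons a t ih =>
    intro hb nd hnd
    have ha : a < 10 := hb a List.mem_cons_self
    have htgt : (m ||| (1 <<< a)) < 1024 := by
      have h1 : (1 <<< a) < 1024 := by
        rw [Nat.shiftLeft_eq, one_mul]
        calc (2:Nat) ^ a < 2 ^ 10 := Nat.pow_lt_pow_right (by norm_num) ha
        _ = 1024 := by norm_num
      exact Nat.or_lt_two_pow (n := 10) (by omega) (by omega)
    have hlen2 : (if pvAllowed m a then pvUpd nd (m ||| (1 <<< a)) x else nd).length = 1024 := by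
      split <;> simp [pvUpd_length, hnd]
    rw [List.foldl_cons, ih (fun dgt h => hb dgt (List.mem_cons_of_mem a h)) _ hlen2,
      pv_phi_ite_upd w nd hnd _ htgt x]
    simp only [List.map_cons, List.sum_cons]
    split <;> ring

theorem pv_phi_digits (w : Nat → ZMod 1000000007) (dp : List Int) (mask : Int)
    (h0 : 0 ≤ mask) (h1 : mask < 1024) (nd : List Int) (hnd : nd.length = 1024) :
    pvPhi w ((PySem.List.pyRange 0 10 1).foldl (pvPlaceDigit dp mask) nd)
      = pvPhi w nd + ((dp.getD mask.toNat 0 : Int) : ZMod 1000000007) * pvCoef w mask.toNat := by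
  have hmask : mask.toNat < 1024 := by omega
  rw [PySem.List.foldl_congr_mem _ (pvPlaceDigit dp mask)
    (fun nd digit => if pvAllowed mask.toNat digit.toNat then
        pvUpd nd (mask.toNat ||| (1 <<< digit.toNat)) (dp.getD mask.toNat 0) else nd) nd
    (by
      intro acc dgt hdgt
      rw [PySem.List.mem_pyRange_one] at hdgt
      exact pv_placeDigit_eq dp mask h0 dgt hdgt.1 hdgt.2 acc)]
  rw [PySem.List.pyRange_one, List.foldl_map]
  simp only [zero_add, Int.toNat_natCast, show ((10:Int) - 0).toNat = 10 from rfl]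
  rw [pv_phi_iteupd_fold w mask.toNat hmask (dp.getD mask.toNat 0) (List.range 10)
    (fun dgt h => List.mem_range.mp h) nd hnd]
  unfold pvCoef
  rw [pv_list_sum_range]


theorem pvPlaceDigit_length (dp : List Int) (mask : Int) (nd : List Int) (digit : Int) :
    (pvPlaceDigit dp mask nd digit).length = nd.length := by
  unfold pvPlaceDigit
  dsimp only
  split_ifs <;> simp [pvUpd]

theorem pv_digits_length (dp : List Int) (mask : Int) (nd : List Int) :
    ((PySem.List.pyRange 0 10 1).foldl (pvPlaceDigit dp mask) nd).length = nd.length := by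
  generalize (PySem.List.pyRange 0 10 1) = l
  induction l generalizing nd with
  | nil => rfl
  | cons a t ih => rw [List.foldl_cons, ih, pvPlaceDigit_length]

theorem pvStep_length (dp : List Int) : (pvStep dp).length = 1024 := by
  unfold pvStep
  generalize (PySem.List.pyRange 0 1024 1) = l
  have : ∀ (nd : List Int), (l.foldl (fun nd mask =>
      if dp.getD mask.toNat 0 = 0 then nd
      else (PySem.List.pyRange 0 10 1).foldl (pvPlaceDigit dp mask) nd) nd).length = nd.length := by
    induction l with
    | nil => intro nd; rfl
    | cons a t ih =>
      intro nd
      rw [List.foldl_cons, ih]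
      split
      · rfl
      · rw [pv_digits_length]
  rw [this, List.length_replicate]


theorem pv_phi_replicate (w : Nat → ZMod 1000000007) :
    pvPhi w (List.replicate 1024 (0 : Int)) = 0 := by
  refine Finset.sum_eq_zero fun j hj => ?_
  rw [Finset.mem_range] at hj
  have h0 : (List.replicate 1024 (0 : Int)).getD j 0 = 0 := by
    rw [List.getD_eq_getElem?_getD, List.getElem?_replicate]
    split <;> rfl
  rw [h0]
  simp

theorem pv_phi_step_fold (w : Nat → ZMod 1000000007) (dp : List Int) :
    ∀ (ms : List Nat), (∀ m ∈ ms, m < 1024) → ∀ (nd : List Int), nd.length = 1024 →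
      pvPhi w (ms.foldl (fun nd m =>
          if dp.getD m 0 = 0 then nd
          else (PySem.List.pyRange 0 10 1).foldl (pvPlaceDigit dp (m : Int)) nd) nd)
        = pvPhi w nd
          + ((ms.map (fun m => ((dp.getD m 0 : Int) : ZMod 1000000007) * pvCoef w m)).sum) := by
  intro ms
  induction ms with
  | nil => intro _ nd hnd; simp
  | cons a t ih =>
    intro hb nd hnd
    have ha : a < 1024 := hb a List.mem_cons_self
    rw [List.foldl_cons]
    by_cases hz : dp.getD a 0 = 0
    · rw [if_pos hz, ih (fun m h => hb m (List.mem_cons_of_mem a h)) nd hnd,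
        List.map_cons, List.sum_cons, hz]
      simp
    · rw [if_neg hz, ih (fun m h => hb m (List.mem_cons_of_mem a h)) _
        (by rw [pv_digits_length]; exact hnd)]
      rw [pv_phi_digits w dp (a : Int) (by omega) (by exact_mod_cast ha) nd hnd]
      simp only [Int.toNat_natCast, List.map_cons, List.sum_cons]
      ring

theorem pv_phi_step (w : Nat → ZMod 1000000007) (dp : List Int) :
    pvPhi w (pvStep dp)
      = ∑ m ∈ Finset.range 1024, ((dp.getD m 0 : Int) : ZMod 1000000007) * pvCoef w m := by
  unfold pvStep
  rw [PySem.List.pyRange_one 0 1024, List.foldl_map]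
  simp only [zero_add, Int.toNat_natCast, show ((1024:Int) - 0).toNat = 1024 from rfl]
  rw [pv_phi_step_fold w dp (List.range 1024) (fun m h => List.mem_range.mp h)
    (List.replicate 1024 0) (by simp)]
  rw [pv_phi_replicate, pv_list_sum_range]
  simp

theorem pv_coef_zero (w : Nat → ZMod 1000000007) (m : Nat)
    (h : ∀ dgt, dgt < 10 → pvAllowed m dgt = true → w (m ||| (1 <<< dgt)) = 0) :
    pvCoef w m = 0 := by
  refine Finset.sum_eq_zero fun dgt hdgt => ?_
  rw [Finset.mem_range] at hdgt
  by_cases hA : pvAllowed m dgt = true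
  · simp [hA, h dgt hdgt hA]
  · simp [hA]

-- components are closed under one placement step
theorem pv_clos : ∀ m, m < 1024 → pvInU m = true →
    ∀ dgt, dgt < 10 → pvAllowed m dgt = true → pvInU (m ||| (1 <<< dgt)) = true := by
  decide

-- from a component mask, one step carries weight pvW s into component s and nothing elsewhere
theorem pv_coef_comp : ∀ m, m < 1024 → pvInU m = true → ∀ s, 1 ≤ s → s ≤ 9 →
    pvCoef (pvInd s) m = if pvComp s m then ((pvW s : Nat) : ZMod 1000000007) else 0 := by
  decide

-- the constant weight 1 splits into the component indicators plus the rest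
theorem pv_part : ∀ j, j < 1024 →
    (1 : ZMod 1000000007)
      = pvInd 1 j + pvInd 2 j + pvInd 3 j + pvInd 4 j + pvInd 5 j + pvInd 6 j + pvInd 7 j
        + pvInd 8 j + pvInd 9 j + (if pvInU j then 0 else 1) := by
  decide


theorem pv_phi_delta (l : List Int) (j : Nat) (hj : j < 1024) :
    pvPhi (fun i => if i = j then 1 else 0) l = ((l.getD j 0 : Int) : ZMod 1000000007) := by
  unfold pvPhi
  rw [Finset.sum_congr rfl (fun i _ => show (if i = j then (1 : ZMod 1000000007) else 0)
      * ((l.getD i 0 : Int) : ZMod 1000000007)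
      = if i = j then ((l.getD i 0 : Int) : ZMod 1000000007) else 0 by split <;> simp)]
  rw [Finset.sum_ite_eq' (Finset.range 1024) j]
  simp [hj]

theorem pv_zinv_step (dp : List Int) (h : pvZinv dp) : pvZinv (pvStep dp) := by
  intro j hj hjU
  rw [← pv_phi_delta (pvStep dp) j hj, pv_phi_step]
  refine Finset.sum_eq_zero fun m hm => ?_
  rw [Finset.mem_range] at hm
  by_cases hU : pvInU m = true
  · have hc : pvCoef (fun i => if i = j then 1 else 0) m = 0 := by
      refine pv_coef_zero _ m fun dgt hdgt hA => ?_
      have ht := pv_clos m hm hU dgt hdgt hA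
      have hne : (m ||| (1 <<< dgt)) ≠ j := by
        intro he
        rw [he, hjU] at ht
        exact Bool.noConfusion ht
      simp [hne]
    rw [hc, mul_zero]
  · rw [h m hm (by simpa using hU), zero_mul]

theorem pv_phi_comp_step (dp : List Int) (h : pvZinv dp) (s : Nat) (h1 : 1 ≤ s) (h9 : s ≤ 9) :
    pvPhi (pvInd s) (pvStep dp) = ((pvW s : Nat) : ZMod 1000000007) * pvPhi (pvInd s) dp := by
  rw [pv_phi_step]
  unfold pvPhi
  rw [Finset.mul_sum]
  refine Finset.sum_congr rfl fun m hm => ?_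
  rw [Finset.mem_range] at hm
  by_cases hU : pvInU m = true
  · rw [pv_coef_comp m hm hU s h1 h9]
    by_cases hc : pvComp s m
    · simp only [pvInd, hc, if_pos]
      ring
    · simp [pvInd, hc]
  · have h0 : ((dp.getD m 0 : Int) : ZMod 1000000007) = 0 := h m hm (by simpa using hU)
    rw [h0]
    simp

set_option maxHeartbeats 2000000 in
theorem pv_main (n : Nat) :
    (pvStep^[n] pvInit).length = 1024 ∧ pvZinv (pvStep^[n] pvInit) ∧
      ∀ s, 1 ≤ s → s ≤ 9 →
        pvPhi (pvInd s) (pvStep^[n] pvInit) = ((pvW s : Nat) : ZMod 1000000007) ^ n := by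
  induction n with
  | zero =>
    simp only [Function.iterate_zero, id]
    refine ⟨by decide, by unfold pvZinv; decide, ?_⟩
    intro s h1 h9
    rw [pow_zero]
    interval_cases s <;> decide
  | succ k ih =>
    obtain ⟨hl, hz, hp⟩ := ih
    refine ⟨?_, ?_, ?_⟩
    · rw [Function.iterate_succ_apply', pvStep_length]
    · rw [Function.iterate_succ_apply']
      exact pv_zinv_step _ hz
    · intro s h1 h9
      rw [Function.iterate_succ_apply', pv_phi_comp_step _ hz s h1 h9, hp s h1 h9, pow_succ]
      ring

theorem pv_foldl_const_iterate {α β : Type} (f : α → α) :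
    ∀ (l : List β) (init : α), l.foldl (fun s _ => f s) init = f^[l.length] init := by
  intro l
  induction l with
  | nil => intro init; rfl
  | cons a t ih => intro init; simp [List.foldl_cons, ih, Function.iterate_succ_apply]


theorem pv_sum_getD {M : Type} [AddCommMonoid M] (l : List M) :
    ∑ i ∈ Finset.range l.length, l.getD i 0 = l.sum := by
  induction l with
  | nil => simp
  | cons a t ih =>
    rw [List.length_cons, Finset.sum_range_succ']
    simp only [List.getD_cons_succ, List.getD_cons_zero, ih, List.sum_cons]
    exact add_comm _ _

theorem pv_sum_cast (dp : List Int) (hdp : dp.length = 1024) :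
    ((dp.foldl (· + ·) 0 : Int) : ZMod 1000000007) = pvPhi (fun _ => 1) dp := by
  rw [← List.sum_eq_foldl, Int.cast_list_sum]
  unfold pvPhi
  simp only [one_mul]
  have h1 : ∀ j ∈ Finset.range 1024, ((dp.getD j 0 : Int) : ZMod 1000000007)
      = (List.map (Int.cast : Int → ZMod 1000000007) dp).getD j 0 := by
    intro j hj
    rw [Finset.mem_range] at hj
    have hj' : j < dp.length := by omega
    simp [List.getD_eq_getElem?_getD, List.getElem?_map, List.getElem?_eq_getElem hj']
  rw [Finset.sum_congr rfl h1,
    show (1024 : Nat) = (List.map (Int.cast : Int → ZMod 1000000007) dp).length by simp [hdp],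
    pv_sum_getD]

theorem pv_phi_rest (dp : List Int) (h : pvZinv dp) :
    pvPhi (fun j => if pvInU j then 0 else 1) dp = 0 := by
  refine Finset.sum_eq_zero fun j hj => ?_
  rw [Finset.mem_range] at hj
  by_cases hU : pvInU j
  · simp [hU]
  · have hz := h j hj (by simpa using hU)
    simp only [List.getD_eq_getElem?_getD] at hz
    simp [hU, List.getD_eq_getElem?_getD, hz]

-- ===== VERDICT (by name: the statement is the Claim_ definition above) =====
theorem pv_powMod_cast (b : Int) (N : Nat) :
    ((PySem.Int.powMod b N 1000000007 : Int) : ZMod 1000000007) = (b : ZMod 1000000007) ^ N := by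
  unfold PySem.Int.powMod
  rw [PySem.Int.mod_eq_emod_of_pos (by norm_num),
    show (1000000007 : Int) = ((1000000007 : ℕ) : ℤ) by norm_num, ZMod.intCast_mod]
  push_cast
  ring

theorem count_pure_sequences_spec : Claim_equal_count_pure_sequences := by
  intro d _
  unfold Spec_count_pure_sequences count_pure_sequences count_pure_sequences_alt
  simp only []
  rw [show ((10 : Int) ^ 9 + 7) = (1000000007 : Int) by norm_num,
    show pvMOD = (1000000007 : Int) by norm_num [pvMOD]]
  set N := (d - 1).toNat with hN
  have hfold : (PySem.List.pyRange 1 d 1).foldl (fun dp _ => pvStep dp) pvInit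
      = pvStep^[N] pvInit := by
    rw [pv_foldl_const_iterate pvStep, PySem.List.length_pyRange_one]
  rw [hfold]
  obtain ⟨hl, hz, hp⟩ := pv_main N
  have hS : (((pvStep^[N] pvInit).foldl (· + ·) 0 : Int) : ZMod 1000000007)
      = (2 : ZMod 1000000007) ^ N + 6 ^ N + 5 ^ N + 4 ^ N + 3 ^ N + 3 ^ N + 3 ^ N + 3 ^ N + 3 ^ N := by
    rw [pv_sum_cast _ hl]
    have hdec : pvPhi (fun _ => (1 : ZMod 1000000007)) (pvStep^[N] pvInit)
        = pvPhi (pvInd 1) (pvStep^[N] pvInit) + pvPhi (pvInd 2) (pvStep^[N] pvInit)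
          + pvPhi (pvInd 3) (pvStep^[N] pvInit) + pvPhi (pvInd 4) (pvStep^[N] pvInit)
          + pvPhi (pvInd 5) (pvStep^[N] pvInit) + pvPhi (pvInd 6) (pvStep^[N] pvInit)
          + pvPhi (pvInd 7) (pvStep^[N] pvInit) + pvPhi (pvInd 8) (pvStep^[N] pvInit)
          + pvPhi (pvInd 9) (pvStep^[N] pvInit)
          + pvPhi (fun j => if pvInU j then 0 else 1) (pvStep^[N] pvInit) := by
      unfold pvPhi
      simp only [← Finset.sum_add_distrib]
      refine Finset.sum_congr rfl fun j hj => ?_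
      rw [Finset.mem_range] at hj
      simp only [← add_mul]
      rw [← pv_part j hj]
    rw [hdec, hp 1 (by norm_num) (by norm_num), hp 2 (by norm_num) (by norm_num),
      hp 3 (by norm_num) (by norm_num), hp 4 (by norm_num) (by norm_num),
      hp 5 (by norm_num) (by norm_num), hp 6 (by norm_num) (by norm_num),
      hp 7 (by norm_num) (by norm_num), hp 8 (by norm_num) (by norm_num),
      hp 9 (by norm_num) (by norm_num), pv_phi_rest _ hz]
    norm_num [pvW]
    try ring
  have hT : ((PySem.Int.powMod 2 N 1000000007 + 5 * PySem.Int.powMod 3 N 1000000007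
        + PySem.Int.powMod 4 N 1000000007 + PySem.Int.powMod 5 N 1000000007
        + PySem.Int.powMod 6 N 1000000007 : Int) : ZMod 1000000007)
      = (2 : ZMod 1000000007) ^ N + 5 * 3 ^ N + 4 ^ N + 5 ^ N + 6 ^ N := by
    push_cast [pv_powMod_cast]
    try ring
  have hcast : (((pvStep^[N] pvInit).foldl (· + ·) 0 : Int) : ZMod 1000000007)
      = ((PySem.Int.powMod 2 N 1000000007 + 5 * PySem.Int.powMod 3 N 1000000007
        + PySem.Int.powMod 4 N 1000000007 + PySem.Int.powMod 5 N 1000000007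
        + PySem.Int.powMod 6 N 1000000007 : Int) : ZMod 1000000007) := by
    rw [hS, hT]
    ring
  have hmodeq := (ZMod.intCast_eq_intCast_iff _ _ _).mp hcast
  unfold Int.ModEq at hmodeq
  norm_num at hmodeq
  exact hmodeq
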